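-- pv_equiv track=rewrite | github.com/chenna4ai-harish/universal_data_Ingestion_platform- | engine/column_mapper.py | _build_lookup_context
-- ===== SOURCE A (Python) =====
-- def _build_lookup_context(lookup_table: dict[str, tuple[str, str]]) -> str:
--     """
--     Group lookup table entries by canonical column and return a compact
--     'known aliases' block for injection into the LLM prompt.
--
--     Example output:
--         TRD_CUSTOMER.Account_Number : account_number, acc_no, debtor_ref, buyer_id ...
--         TRD_INVOICE.Invoice_Number  : invoice_number, inv_no, bill_number, invoice_ref ...
--     """
--     groups: dict[str, list[str]] = {}
--     for variant, (tbl, col) in lookup_table.items():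
--         groups.setdefault(f"{tbl}.{col}", []).append(variant)
--
--     lines = []
--     for key in sorted(groups):
--         aliases = ", ".join(sorted(groups[key]))
--         lines.append(f"  {key} : {aliases}")
--     return "\n".join(lines)
-- ===== SOURCE B (Python) =====
-- def _build_lookup_context(lookup_table: dict[str, tuple[str, str]]) -> str:
--     pairs = sorted((f"{tbl}.{col}", variant) for variant, (tbl, col) in lookup_table.items())
--     lines = []
--     cur = None  # (key, text of the line being assembled)
--     for key, variant in pairs:
--         if cur is not None and cur[0] == key:
--             cur = (key, cur[1] + ", " + variant)
--         else:
--             if cur is not None: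
--                 lines.append(cur[1])
--             cur = (key, "  " + key + " : " + variant)
--     if cur is not None:
--         lines.append(cur[1])
--     return "\n".join(lines)
-- ===== Notes on version B (the rewrite author's own statement) =====
-- stated objective: alternative
-- what changed: B drops A's dict-of-lists grouping with a per-group sort: it sorts one flat list of (table.column, variant) tuples lexicographically and emits the lines in a single scan that merges adjacent tuples with equal keys.
import Mathlib
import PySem

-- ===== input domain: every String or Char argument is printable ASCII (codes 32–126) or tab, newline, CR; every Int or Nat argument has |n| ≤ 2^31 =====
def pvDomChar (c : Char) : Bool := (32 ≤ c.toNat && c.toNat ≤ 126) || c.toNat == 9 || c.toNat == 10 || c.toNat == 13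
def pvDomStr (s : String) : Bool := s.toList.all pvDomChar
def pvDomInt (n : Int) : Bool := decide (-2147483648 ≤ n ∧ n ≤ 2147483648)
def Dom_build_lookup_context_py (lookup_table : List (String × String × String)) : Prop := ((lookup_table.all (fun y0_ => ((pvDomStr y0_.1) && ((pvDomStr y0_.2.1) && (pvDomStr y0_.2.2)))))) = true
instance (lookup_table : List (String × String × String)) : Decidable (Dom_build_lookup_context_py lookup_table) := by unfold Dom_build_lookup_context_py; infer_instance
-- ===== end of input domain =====

-- B replaces A's dict-of-lists grouping (with a per-group sort) by one global
-- lexicographic sort of flat (key, variant) tuples followed by a single merging scan.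

-- ===== PORT A =====
-- groups.setdefault(key, []).append(variant) is d[key] = d.get(key, []) + [variant] = Dict.modify key [] (· ++ [variant])
def build_lookup_context_py (lookup_table : List (String × String × String)) : String :=
  let groups : PySem.Dict String (List String) :=
    lookup_table.foldl
      (fun g e => g.modify (e.2.1 ++ "." ++ e.2.2) [] (fun l => l ++ [e.1])) PySem.Dict.empty
  let lines : List String :=
    (PySem.List.sorted (PySem.Dict.keys groups) (fun x => x) false).foldl
      (fun lines key =>
        lines ++ ["  " ++ key ++ " : " ++
          PySem.Str.join ", " (PySem.List.sorted (groups.getD key []) (fun x => x) false)]) []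
  PySem.Str.join "\n" lines

-- ===== PORT B =====
-- state of Source B's scan: (lines, cur); cur = None ↦ none, cur = (key, text) ↦ some (key, text)
def pvStepB (s : List String × Option (String × String)) (p : String × String) :
    List String × Option (String × String) :=
  match s.2 with
  | some c =>
    if c.1 == p.1 then (s.1, some (p.1, c.2 ++ ", " ++ p.2))
    else (s.1 ++ [c.2], some (p.1, "  " ++ p.1 ++ " : " ++ p.2))
  | none => (s.1, some (p.1, "  " ++ p.1 ++ " : " ++ p.2))

-- the trailing 'if cur is not None: lines.append(cur[1])'
def pvFlushB (s : List String × Option (String × String)) : List String :=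
  match s.2 with
  | some c => s.1 ++ [c.2]
  | none => s.1

-- Python's tuple comparison on (str, str) is the lexicographic order: sort key 'toLex'
def build_lookup_context_py_alt (lookup_table : List (String × String × String)) : String :=
  let pairs : List (String × String) :=
    PySem.List.sorted (lookup_table.map (fun e => (e.2.1 ++ "." ++ e.2.2, e.1)))
      (fun p => toLex p) false
  PySem.Str.join "\n" (pvFlushB (pairs.foldl pvStepB ([], none)))

-- ===== PRECONDITION & SPEC =====
def Spec_build_lookup_context_py (lookup_table : List (String × String × String)) (out : String) : Prop := out = build_lookup_context_py_alt lookup_table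
instance (lookup_table : List (String × String × String)) (out : String) : Decidable (Spec_build_lookup_context_py lookup_table out) := by unfold Spec_build_lookup_context_py; infer_instance

-- ===== CLAIM (what is proved, stated in full; the proofs are below) =====
def Claim_equal_build_lookup_context_py : Prop := ∀ (lookup_table : List (String × String × String)), Dom_build_lookup_context_py lookup_table → Spec_build_lookup_context_py lookup_table (build_lookup_context_py lookup_table)

-- ===== LEMMAS AND PROOFS =====

-- canonical pieces shared by the two sides
def pvV (P : List (String × String)) (k : String) : List String :=
  PySem.List.sorted ((P.filter (fun p => p.1 == k)).map (fun p => p.2)) (fun x => x) false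

def pvK (P : List (String × String)) : List String :=
  PySem.List.sorted (PySem.Set.ofList (P.map (fun p => p.1))) (fun x => x) false

def pvLine (P : List (String × String)) (k : String) : String :=
  "  " ++ k ++ " : " ++ PySem.Str.join ", " (pvV P k)

def pvL (P : List (String × String)) : List (String × String) :=
  (pvK P).flatMap (fun k => (pvV P k).map (fun v => (k, v)))

-- a foldl that appends one element per step is a map
theorem pv_foldl_append_map {α β : Type} (f : α → β) (l : List α) (acc : List β) :
    l.foldl (fun acc x => acc ++ [f x]) acc = acc ++ l.map f := by
  induction l generalizing acc with
  | nil => simp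
  | cons x t ih => simp [List.foldl_cons, ih]

theorem pv_flatMap_congr {α β : Type} (K : List α) (f g : α → List β)
    (h : ∀ a ∈ K, f a = g a) : K.flatMap f = K.flatMap g := by
  induction K with
  | nil => simp
  | cons k K ih =>
    simp only [List.flatMap_cons, h k (by simp), ih (fun a ha => h a (by simp [ha]))]

theorem pv_flatMap_perm {α β : Type} (K : List α) (f g : α → List β)
    (h : ∀ a ∈ K, (f a).Perm (g a)) : (K.flatMap f).Perm (K.flatMap g) := by
  induction K with
  | nil => simp
  | cons k K ih =>
    simp only [List.flatMap_cons]
    exact (h k (by simp)).append (ih (fun a ha => h a (by simp [ha])))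

theorem pv_perm_filter_flat (K : List String) (P : List (String × String))
    (hnd : K.Nodup) (hcov : ∀ p ∈ P, p.1 ∈ K) :
    (K.flatMap (fun k => P.filter (fun p => p.1 == k))).Perm P := by
  induction K generalizing P with
  | nil =>
    have hP : P = [] :=
      List.eq_nil_iff_forall_not_mem.mpr (fun p hp => absurd (hcov p hp) (List.not_mem_nil))
    subst hP; simp
  | cons k K ih =>
    simp only [List.flatMap_cons]
    have hK : ∀ k' ∈ K, P.filter (fun p => p.1 == k')
        = (P.filter (fun p => !(p.1 == k))).filter (fun p => p.1 == k') := by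
      intro k' hk'
      rw [List.filter_filter]
      apply List.filter_congr
      intro p _
      by_cases h : p.1 = k'
      · have hpk : ¬ p.1 = k := by
          intro hkk; exact (List.nodup_cons.mp hnd).1 (by simpa [← hkk, ← h] using hk')
        have hkk' : ¬ k' = k := fun he => hpk (h.trans he)
        simp [h, hkk']
      · simp [h]
    rw [pv_flatMap_congr K _ _ hK]
    have hperm := ih (P.filter (fun p => !(p.1 == k))) (List.nodup_cons.mp hnd).2
      (by
        intro p hp
        rcases List.mem_filter.mp hp with ⟨hpP, hne⟩
        have := hcov p hpP
        simp only [List.mem_cons] at this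
        rcases this with h | h
        · simp [h] at hne
        · exact h)
    exact (List.Perm.append_left _ hperm).trans (List.filter_append_perm _ P)

theorem pv_L_perm (P : List (String × String)) : (pvL P).Perm P := by
  have hstep : ∀ k ∈ pvK P, ((pvV P k).map (fun v => (k, v))).Perm (P.filter (fun p => p.1 == k)) := by
    intro k _
    have h1 : ((P.filter (fun p => p.1 == k)).map (fun p => p.2)).map (fun v => (k, v))
        = P.filter (fun p => p.1 == k) := by
      rw [List.map_map]
      have h2 : ∀ p ∈ P.filter (fun p => p.1 == k), ((fun v => (k, v)) ∘ (fun p : String × String => p.2)) p = id p := by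
        intro p hp
        have := (List.mem_filter.mp hp).2
        have hk : p.1 = k := by simpa using this
        simp [Function.comp, ← hk]
      rw [List.map_congr_left h2, List.map_id]
    calc ((pvV P k).map (fun v => (k, v))).Perm
          ((((P.filter (fun p => p.1 == k)).map (fun p => p.2))).map (fun v => (k, v))) :=
        (PySem.List.sorted_perm _ _ _).map _
      _ = P.filter (fun p => p.1 == k) := h1
  have hnd : (pvK P).Nodup := by
    unfold pvK
    exact (PySem.List.sorted_ofList_pairwise_lt (P.map (fun p => p.1))).imp (fun h => ne_of_lt h)
  have hcov : ∀ p ∈ P, p.1 ∈ pvK P := by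
    intro p hp
    simp only [pvK, PySem.List.mem_sorted, PySem.Set.mem_ofList]
    exact List.mem_map_of_mem hp
  exact (pv_flatMap_perm _ _ _ hstep).trans (pv_perm_filter_flat _ P hnd hcov)

theorem pv_flat_pairwise (P : List (String × String)) (K : List String)
    (hpw : K.Pairwise (· < ·)) :
    (K.flatMap (fun k => (pvV P k).map (fun v => (k, v)))).Pairwise
      (fun a b => (toLex a : Lex (String × String)) ≤ toLex b) := by
  induction K with
  | nil => simp
  | cons k K ih =>
    simp only [List.flatMap_cons]
    rw [List.pairwise_append]
    refine ⟨?_, ih hpw.tail, ?_⟩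
    · rw [List.pairwise_map]
      unfold pvV
      refine List.Pairwise.imp ?_
        (PySem.List.sorted_pairwise ((P.filter (fun p => p.1 == k)).map (fun p => p.2)) (fun x => x))
      intro a b h
      exact Prod.Lex.toLex_le_toLex.mpr (Or.inr ⟨rfl, h⟩)
    · intro a ha b hb
      rcases List.mem_map.mp ha with ⟨v, _, rfl⟩
      rcases List.mem_flatMap.mp hb with ⟨k', hk', hb'⟩
      rcases List.mem_map.mp hb' with ⟨w, _, rfl⟩
      have hlt : k < k' := (List.pairwise_cons.mp hpw).1 k' hk'
      exact Prod.Lex.toLex_le_toLex.mpr (Or.inl hlt)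

theorem pv_K_pairwise (P : List (String × String)) : (pvK P).Pairwise (· < ·) := by
  unfold pvK
  exact PySem.List.sorted_ofList_pairwise_lt (P.map (fun p => p.1))

theorem pv_L_pairwise (P : List (String × String)) :
    (pvL P).Pairwise (fun a b => (toLex a : Lex (String × String)) ≤ toLex b) :=
  pv_flat_pairwise P (pvK P) (pv_K_pairwise P)

theorem pv_sorted_eq_L (P : List (String × String)) :
    PySem.List.sorted P (fun p => toLex p) false = pvL P := by
  apply PySem.List.eq_of_perm_of_pairwise_le_of_injective (fun p => toLex p)
  · intro a b h; simpa using congrArg ofLex h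
  · exact (PySem.List.sorted_perm _ _ _).trans (pv_L_perm P).symm
  · exact PySem.List.sorted_pairwise _ _
  · exact pv_L_pairwise P

-- ----- string/join lemmas -----
theorem pv_chars_join_cons₂ (s x y : List Char) (ys : List (List Char)) :
    PySem.Chars.join s (x :: y :: ys) = x ++ s ++ PySem.Chars.join s (y :: ys) := by
  simp [PySem.Chars.join, List.intercalate, List.intersperse_cons₂]

theorem pv_chars_join_shift (s a b : List Char) (M : List (List Char)) :
    PySem.Chars.join s ((a ++ s ++ b) :: M) = a ++ s ++ PySem.Chars.join s (b :: M) := by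
  cases M with
  | nil => simp [PySem.Chars.join, List.intercalate]
  | cons c M => simp [PySem.Chars.join, List.intercalate, List.intersperse_cons₂]

theorem pv_str_join_cons₂ (s x y : String) (ys : List String) :
    PySem.Str.join s (x :: y :: ys) = PySem.Str.join s ((x ++ s ++ y) :: ys) := by
  simp only [PySem.Str.join, List.map_cons, pv_chars_join_cons₂, String.toList_append,
    pv_chars_join_shift]

theorem pv_join_foldl (s : String) (x : String) (xs : List String) :
    xs.foldl (fun a v => a ++ s ++ v) x = PySem.Str.join s (x :: xs) := by
  induction xs generalizing x with
  | nil => simp [PySem.Str.join, PySem.Chars.join, List.intercalate, String.ofList_toList]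
  | cons y ys ih =>
    rw [List.foldl_cons, ih, pv_str_join_cons₂]

theorem pv_foldl_str_shift (xs : List String) (s c x : String) :
    xs.foldl (fun a v => a ++ s ++ v) (c ++ x) = c ++ xs.foldl (fun a v => a ++ s ++ v) x := by
  induction xs generalizing x with
  | nil => simp
  | cons y ys ih =>
    simp only [List.foldl_cons]
    rw [show c ++ x ++ s ++ y = c ++ (x ++ s ++ y) by simp [String.append_assoc]]
    exact ih _

-- ----- scan lemmas -----
theorem pv_scan_group (vs : List String) (k t : String) (lines : List String) :
    (vs.map (fun v => (k, v))).foldl pvStepB (lines, some (k, t))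
      = (lines, some (k, vs.foldl (fun a v => a ++ ", " ++ v) t)) := by
  induction vs generalizing t with
  | nil => simp
  | cons v vs ih => simp [pvStepB, ih]

theorem pv_scan_main (P : List (String × String)) (K : List String)
    (hpw : K.Pairwise (· < ·)) (hne : ∀ k ∈ K, pvV P k ≠ [])
    (cur : Option (String × String)) (lines : List String)
    (hcur : ∀ c, cur = some c → ∀ k ∈ K, c.1 ≠ k) :
    pvFlushB ((K.flatMap (fun k => (pvV P k).map (fun v => (k, v)))).foldl pvStepB (lines, cur))
      = (cur.elim lines (fun c => lines ++ [c.2])) ++ K.map (pvLine P) := by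
  induction K generalizing cur lines with
  | nil =>
    cases cur <;> simp [pvFlushB]
  | cons k K ih =>
    obtain ⟨v0, vs, hv⟩ : ∃ v0 vs, pvV P k = v0 :: vs := by
      cases h : pvV P k with
      | nil => exact absurd h (hne k (by simp))
      | cons a b => exact ⟨a, b, rfl⟩
    simp only [List.flatMap_cons, List.foldl_append, hv, List.map_cons, List.foldl_cons]
    have hstep1 : pvStepB (lines, cur) (k, v0)
        = (cur.elim lines (fun c => lines ++ [c.2]), some (k, "  " ++ k ++ " : " ++ v0)) := by
      cases cur with
      | none => simp [pvStepB]
      | some c =>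
        have hc : (c.1 == k) = false := by
          simpa using hcur c rfl k (by simp)
        simp [pvStepB, hc]
    rw [hstep1, pv_scan_group]
    have hline : vs.foldl (fun a v => a ++ ", " ++ v) ("  " ++ k ++ " : " ++ v0) = pvLine P k := by
      have h0 : ("  " ++ k ++ " : " ++ v0) = ("  " ++ k ++ " : ") ++ v0 := by
        simp [String.append_assoc]
      rw [h0, pv_foldl_str_shift, pv_join_foldl, pvLine, ← hv]
    rw [hline]
    rw [ih hpw.tail (fun k' hk' => hne k' (by simp [hk']))
      (some (k, pvLine P k)) (cur.elim lines (fun c => lines ++ [c.2]))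
      (by
        intro c hc k' hk'
        cases hc
        exact ne_of_lt ((List.pairwise_cons.mp hpw).1 k' hk'))]
    cases cur <;> simp

theorem pv_A_eq (lookup_table : List (String × String × String)) :
    build_lookup_context_py lookup_table
      = PySem.Str.join "\n"
          ((pvK (lookup_table.map (fun e => (e.2.1 ++ "." ++ e.2.2, e.1)))).map
            (fun k => pvLine (lookup_table.map (fun e => (e.2.1 ++ "." ++ e.2.2, e.1))) k)) := by
  have hG : lookup_table.foldl
        (fun g e => g.modify (e.2.1 ++ "." ++ e.2.2) [] (fun l => l ++ [e.1]))
        (PySem.Dict.empty : PySem.Dict String (List String))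
      = ((lookup_table.map (fun e => (e.2.1 ++ "." ++ e.2.2, e.1))).foldl
        (fun g p => g.modify p.1 [] (fun l => l ++ [p.2])) PySem.Dict.empty) := by
    rw [List.foldl_map]
  simp only [build_lookup_context_py, hG, PySem.Dict.keys_foldl_modify_key,
    PySem.Dict.getD_foldl_modify_append, PySem.Dict.getD_empty, PySem.Dict.keys_empty,
    PySem.Set.update_nil_left, pv_foldl_append_map, List.nil_append, pvK, pvLine, pvV]

theorem pv_V_nonempty (P : List (String × String)) (k : String) (hk : k ∈ pvK P) :
    pvV P k ≠ [] := by
  intro h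
  rw [pvV, PySem.List.sorted_eq_nil_iff, List.map_eq_nil_iff, List.filter_eq_nil_iff] at h
  simp only [pvK, PySem.List.mem_sorted, PySem.Set.mem_ofList, List.mem_map] at hk
  rcases hk with ⟨p, hp, rfl⟩
  exact h p hp (by simp)

set_option maxHeartbeats 1000000 in
theorem build_lookup_context_py_aux (lookup_table : List (String × String × String)) :
    build_lookup_context_py lookup_table = build_lookup_context_py_alt lookup_table := by
  rw [pv_A_eq]
  unfold build_lookup_context_py_alt
  rw [pv_sorted_eq_L, pvL]
  show _ = PySem.Str.join "\n" (pvFlushB (List.foldl pvStepB ([], none)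
    (List.flatMap
      (fun k => List.map (fun v => (k, v)) (pvV (List.map (fun e => (e.2.1 ++ "." ++ e.2.2, e.1)) lookup_table) k))
      (pvK (List.map (fun e => (e.2.1 ++ "." ++ e.2.2, e.1)) lookup_table)))))
  rw [pv_scan_main (lookup_table.map (fun e => (e.2.1 ++ "." ++ e.2.2, e.1)))
      (pvK (lookup_table.map (fun e => (e.2.1 ++ "." ++ e.2.2, e.1))))
      (pv_K_pairwise _) (fun k hk => pv_V_nonempty _ k hk) none [] (by intro c hc; cases hc)]
  simp

-- ===== VERDICT (by name: the statement is the Claim_ definition above) =====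
theorem build_lookup_context_py_spec : Claim_equal_build_lookup_context_py := by
  intro lt _
  unfold Spec_build_lookup_context_py
  exact build_lookup_context_py_aux lt
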